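-- pv_equiv track=rewrite | github.com/jawaddxb/desksnapv4c | packages/common/services/mess_analyzer.py | calculate_density_score
-- ===== SOURCE A (Python) =====
-- from typing import Any
--
-- def calculate_density_score(texts: list[dict[str, Any]]) -> float:
--     """
--     Words per slide. Higher = messier.
--     """
--     if not texts:
--         return 0
--
--     total_words = sum(
--         len(text.get("value", "").split())
--         for text in texts
--     )
--
--     # Scoring: 0-50 words = 0, 100+ words = 100
--     if total_words <= 50:
--         return 0
--     elif total_words <= 75:
--         return 30
--     elif total_words <= 100:
--         return 60
--     elif total_words <= 150:
--         return 80
--     else: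
--         return 100
-- ===== SOURCE B (Python) =====
-- # Streaming re-implementation: counts word starts with a char-level scan (no split),
-- # and computes the score as a sum of threshold indicators (no branch cascade, no table).
-- def calculate_density_score(texts):
--     if not texts:
--         return 0
--     total = 0
--     for text in texts:
--         in_word = False
--         for ch in text.get("value", ""):
--             if not ch.isspace():
--                 if not in_word:
--                     total += 1
--                 in_word = True
--             else:
--                 in_word = False
--     return 30 * (total > 50) + 30 * (total > 75) + 20 * (total > 100) + 20 * (total > 150)
-- ===== Notes on version B (the rewrite author's own statement) =====
-- stated objective: alternative
-- what changed: Replaces per-text split()-and-count with a single character-level streaming scan that counts word starts, and replaces the if/elif bucket cascade with a sum of threshold indicators (30*(t>50)+30*(t>75)+20*(t>100)+20*(t>150)).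
import Mathlib
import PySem

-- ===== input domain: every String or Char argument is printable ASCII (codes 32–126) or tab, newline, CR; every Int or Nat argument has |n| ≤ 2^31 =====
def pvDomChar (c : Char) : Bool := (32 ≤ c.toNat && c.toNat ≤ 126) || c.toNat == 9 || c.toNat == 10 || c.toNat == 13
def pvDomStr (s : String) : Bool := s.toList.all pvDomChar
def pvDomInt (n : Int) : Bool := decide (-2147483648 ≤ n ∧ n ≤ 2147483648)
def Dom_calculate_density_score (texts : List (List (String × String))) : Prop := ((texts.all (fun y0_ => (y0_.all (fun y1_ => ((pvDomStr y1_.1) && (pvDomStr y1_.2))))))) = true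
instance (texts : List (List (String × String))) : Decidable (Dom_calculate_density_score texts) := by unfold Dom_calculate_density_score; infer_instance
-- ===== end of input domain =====

-- B replaces split()-based word counting with a streaming word-start scan and the
-- if/elif cascade with a sum of threshold indicators (alternative, same cost).

-- ===== PORT A =====
def calculate_density_score (texts : List (List (String × String))) : Int :=
  if texts = [] then 0
  else
    let total_words : Int := texts.foldl (fun acc text =>
      acc + ((PySem.Str.split₀ ((PySem.Dict.ofList text).getD "value" "")).length : Int)) 0
    if total_words ≤ 50 then 0
    else if total_words ≤ 75 then 30
    else if total_words ≤ 100 then 60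
    else if total_words ≤ 150 then 80
    else 100

-- ===== PORT B =====
-- char-level scan over the value: state = (in_word, running total); counts word starts
def calculate_density_score_alt (texts : List (List (String × String))) : Int :=
  if texts = [] then 0
  else
    let st : Bool × Int := texts.foldl (fun st text =>
      (((PySem.Dict.ofList text).getD "value" "").toList.foldl
        (fun (st : Bool × Int) c =>
          if ¬ PySem.Chars.isspace c then
            (true, if ¬ st.1 then st.2 + 1 else st.2)
          else
            (false, st.2))
        (false, st.2))) (false, 0)
    let total := st.2
    30 * (if total > 50 then (1:Int) else 0) + 30 * (if total > 75 then 1 else 0)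
      + 20 * (if total > 100 then 1 else 0) + 20 * (if total > 150 then 1 else 0)

-- ===== PRECONDITION & SPEC =====
def Spec_calculate_density_score (texts : List (List (String × String))) (out : Int) : Prop := out = calculate_density_score_alt texts
instance (texts : List (List (String × String))) (out : Int) : Decidable (Spec_calculate_density_score texts out) := by unfold Spec_calculate_density_score; infer_instance

-- ===== CLAIM =====
def Claim_equal_calculate_density_score : Prop := ∀ (texts : List (List (String × String))), Dom_calculate_density_score texts → Spec_calculate_density_score texts (calculate_density_score texts)

-- ===== LEMMAS AND PROOFS =====
-- number of word starts in cs given whether we are currently inside a word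
def pvCountFrom (cs : List Char) (inWord : Bool) : Int :=
  match cs with
  | [] => 0
  | c :: rest =>
    if PySem.Chars.isspace c then pvCountFrom rest false
    else (if inWord then 0 else 1) + pvCountFrom rest true

theorem scan_eq_countFrom (cs : List Char) (b : Bool) (n : Int) :
    (cs.foldl (fun (st : Bool × Int) c =>
        if ¬ PySem.Chars.isspace c then (true, if ¬ st.1 then st.2 + 1 else st.2)
        else (false, st.2)) (b, n)).2 = n + pvCountFrom cs b := by
  induction cs generalizing b n with
  | nil => simp [pvCountFrom]
  | cons c rest ih =>
    rw [List.foldl_cons]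
    by_cases h : PySem.Chars.isspace c
    · rw [if_neg (by simp [h]), ih, pvCountFrom, if_pos h]
    · rw [if_pos (by simp [h]), ih, pvCountFrom, if_neg h]
      cases b <;> simp <;> omega

theorem go_length (cs cur : List Char) (acc : List (List Char)) :
    ((PySem.Chars.split₀.go cs cur acc).length : Int)
      = acc.length + (if cur.isEmpty then 0 else 1) + pvCountFrom cs (!cur.isEmpty) := by
  induction cs generalizing cur acc with
  | nil =>
    by_cases h : cur.isEmpty <;> simp [PySem.Chars.split₀.go, h, pvCountFrom]
  | cons c rest ih =>
    simp only [PySem.Chars.split₀.go]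
    by_cases hs : PySem.Chars.isspace c
    · by_cases h : cur.isEmpty <;>
        simp [hs, h, ih, pvCountFrom] <;> push_cast <;> ring
    · by_cases h : cur.isEmpty <;>
        simp [hs, h, ih, pvCountFrom] <;> push_cast <;> ring

theorem split₀_length (s : String) :
    ((PySem.Str.split₀ s).length : Int) = pvCountFrom s.toList false := by
  have := go_length s.toList [] []
  simpa [PySem.Str.split₀, PySem.Chars.split₀] using this

theorem totals_eq (texts : List (List (String × String))) (b : Bool) (n : Int) :
    (texts.foldl (fun st text =>
      (((PySem.Dict.ofList text).getD "value" "").toList.foldl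
        (fun (st : Bool × Int) c =>
          if ¬ PySem.Chars.isspace c then (true, if ¬ st.1 then st.2 + 1 else st.2)
          else (false, st.2))
        (false, st.2))) (b, n)).2
    = texts.foldl (fun acc text =>
        acc + ((PySem.Str.split₀ ((PySem.Dict.ofList text).getD "value" "")).length : Int)) n := by
  induction texts generalizing b n with
  | nil => rfl
  | cons t rest ih =>
    simp only [List.foldl]
    have h1 := scan_eq_countFrom (((PySem.Dict.ofList t).getD "value" "")).toList false n
    have h2 := split₀_length ((PySem.Dict.ofList t).getD "value" "")
    set p := (((PySem.Dict.ofList t).getD "value" "").toList.foldl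
        (fun (st : Bool × Int) c =>
          if ¬ PySem.Chars.isspace c then (true, if ¬ st.1 then st.2 + 1 else st.2)
          else (false, st.2)) ((false : Bool), n)) with hp
    have hpp : p = (p.1, p.2) := rfl
    rw [hpp, ih]
    rw [h1, h2]

theorem bucket_eq (t : Int) :
    (if t ≤ 50 then (0:Int) else if t ≤ 75 then 30 else if t ≤ 100 then 60 else if t ≤ 150 then 80 else 100)
      = 30 * (if t > 50 then (1:Int) else 0) + 30 * (if t > 75 then 1 else 0)
        + 20 * (if t > 100 then 1 else 0) + 20 * (if t > 150 then 1 else 0) := by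
  split_ifs <;> omega

-- ===== VERDICT =====
theorem calculate_density_score_spec : Claim_equal_calculate_density_score := by
  intro texts _
  unfold Spec_calculate_density_score calculate_density_score calculate_density_score_alt
  by_cases h : texts = []
  · simp [h]
  · simp only [h, if_false]
    rw [totals_eq, ← bucket_eq]
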